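-- pv_equiv track=rewrite | github.com/EoinF/GoogleCodejam | 2018/qual/qual3.py | move_right_if_needed
-- ===== SOURCE A (Python) =====
-- def hash_x_y(x, y, n):
--     return y * n + x
--
-- def move_right_if_needed(
--     current_square_buffer,
--     top_edge_hits,
--     left_edge_x,
--     right_edge_x,
--     top_edge_y,
--     bottom_edge_y,
--     n,
-- ):
--     while left_edge_x in top_edge_hits and left_edge_x + 3 < right_edge_x:
--         top_edge_hits.remove(left_edge_x)
--         left_edge_x += 1
--
--     if top_edge_y + 3 < bottom_edge_y and left_edge_x + 3 == right_edge_x: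
--         if len(top_edge_hits) == 3:
--             left_edge_x = 0
--             top_edge_y += 1
--             top_edge_hits = set(
--                 [
--                     p
--                     for p in range(3)
--                     if hash_x_y(p, top_edge_y, n) in current_square_buffer
--                 ]
--             )
--             if top_edge_y + 3 < bottom_edge_y:
--                 return move_right_if_needed(
--                     current_square_buffer,
--                     top_edge_hits,
--                     left_edge_x,
--                     right_edge_x,
--                     top_edge_y,
--                     bottom_edge_y,
--                     n,
--                 )
--
--     return left_edge_x, top_edge_y
-- ===== SOURCE B (Python) =====
-- def move_right_if_needed(
--     current_square_buffer,
--     top_edge_hits,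
--     left_edge_x,
--     right_edge_x,
--     top_edge_y,
--     bottom_edge_y,
--     n,
-- ):
--     # Iterative version: explicit while-True loop instead of tail recursion,
--     # and no mutation of top_edge_hits: the advance step only reads membership
--     # and the surviving size is tracked arithmetically.
--     hits = top_edge_hits
--     hits_len = len(top_edge_hits)
--     while True:
--         x = left_edge_x
--         while x in hits and x + 3 < right_edge_x:
--             x += 1
--         hits_len -= x - left_edge_x
--         left_edge_x = x
--         if (top_edge_y + 3 < bottom_edge_y
--                 and left_edge_x + 3 == right_edge_x
--                 and hits_len == 3):
--             left_edge_x = 0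
--             top_edge_y += 1
--             hits = [p for p in range(3)
--                     if top_edge_y * n + p in current_square_buffer]
--             hits_len = len(hits)
--             if top_edge_y + 3 < bottom_edge_y:
--                 continue
--         return left_edge_x, top_edge_y
-- ===== Notes on version B (the rewrite author's own statement) =====
-- stated objective: alternative
-- what changed: Tail recursion replaced by an explicit while-True loop with the nested len==3 test flattened into one condition, and the destructive remove-loop replaced by a read-only membership scan whose removal count is tracked arithmetically (B never mutates top_edge_hits, unlike A).
import Mathlib
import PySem

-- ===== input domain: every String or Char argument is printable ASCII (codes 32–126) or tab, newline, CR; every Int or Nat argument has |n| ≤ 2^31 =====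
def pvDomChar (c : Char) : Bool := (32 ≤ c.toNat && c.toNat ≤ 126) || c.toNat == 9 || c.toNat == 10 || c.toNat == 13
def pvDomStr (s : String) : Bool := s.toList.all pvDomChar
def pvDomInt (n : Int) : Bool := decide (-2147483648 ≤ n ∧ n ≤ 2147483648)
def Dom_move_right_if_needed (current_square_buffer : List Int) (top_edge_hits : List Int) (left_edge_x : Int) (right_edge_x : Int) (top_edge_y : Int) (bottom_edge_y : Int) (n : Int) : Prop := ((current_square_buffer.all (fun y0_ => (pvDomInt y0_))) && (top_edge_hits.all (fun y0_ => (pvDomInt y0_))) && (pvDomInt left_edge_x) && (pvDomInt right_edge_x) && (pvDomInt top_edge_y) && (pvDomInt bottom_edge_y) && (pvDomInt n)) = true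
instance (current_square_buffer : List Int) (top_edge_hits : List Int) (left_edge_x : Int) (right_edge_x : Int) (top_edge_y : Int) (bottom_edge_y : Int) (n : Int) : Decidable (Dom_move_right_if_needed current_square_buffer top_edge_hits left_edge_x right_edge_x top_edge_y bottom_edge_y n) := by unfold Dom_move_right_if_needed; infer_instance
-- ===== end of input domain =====

-- B replaces A's tail recursion by an explicit loop and A's destructive remove-loop by a
-- read-only membership scan with an arithmetic size counter; the equivalence proved is about
-- the RETURN value only (A mutates top_edge_hits in place via remove, B does not mutate it).

-- ===== PORT A =====
def hash_x_y (x : Int) (y : Int) (n : Int) : Int := y * n + x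

-- A's while-loop: remove left_edge_x from hits and advance while it is a member and room remains
def advA (hits : List Int) (lx : Int) (rx : Int) : List Int × Int :=
  if _h : hits.contains lx ∧ lx + 3 < rx then
    match PySem.List.remove? hits lx with
    | some hits' => advA hits' (lx + 1) rx
    | none => (hits, lx)   -- unreachable totality guard: membership holds here
  else (hits, lx)
termination_by (rx - lx).toNat
decreasing_by omega

def move_right_if_needed (current_square_buffer : List Int) (top_edge_hits : List Int) (left_edge_x : Int) (right_edge_x : Int) (top_edge_y : Int) (bottom_edge_y : Int) (n : Int) : Int × Int :=
  let r := advA top_edge_hits left_edge_x right_edge_x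
  let hits := r.1
  let lx := r.2
  if top_edge_y + 3 < bottom_edge_y ∧ lx + 3 = right_edge_x then
    if hits.length = 3 then
      let ty := top_edge_y + 1
      let hits2 := PySem.Set.ofList ((PySem.List.pyRange 0 3 1).filter
        (fun p => current_square_buffer.contains (hash_x_y p ty n)))
      if _h2 : ty + 3 < bottom_edge_y then
        move_right_if_needed current_square_buffer hits2 0 right_edge_x ty bottom_edge_y n
      else (0, ty)
    else (lx, top_edge_y)
  else (lx, top_edge_y)
termination_by (bottom_edge_y - top_edge_y).toNat
decreasing_by omega

-- ===== PORT B =====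
-- B's inner while-loop: advance x past members of hits without mutating the list
def altAdvance (hits : List Int) (x : Int) (rx : Int) : Int :=
  if hits.contains x ∧ x + 3 < rx then altAdvance hits (x + 1) rx else x
termination_by (rx - x).toNat
decreasing_by omega

-- B's outer while-True loop, carrying the surviving-size counter hitsLen
def altLoop (current_square_buffer : List Int) (hits : List Int) (hitsLen : Int) (left_edge_x : Int) (right_edge_x : Int) (top_edge_y : Int) (bottom_edge_y : Int) (n : Int) : Int × Int :=
  let x := altAdvance hits left_edge_x right_edge_x
  let hitsLen2 := hitsLen - (x - left_edge_x)
  if top_edge_y + 3 < bottom_edge_y ∧ x + 3 = right_edge_x ∧ hitsLen2 = 3 then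
    let ty := top_edge_y + 1
    let hits2 := (PySem.List.pyRange 0 3 1).filter
      (fun p => current_square_buffer.contains (ty * n + p))
    if _h2 : ty + 3 < bottom_edge_y then
      altLoop current_square_buffer hits2 (hits2.length : Int) 0 right_edge_x ty bottom_edge_y n
    else (0, ty)
  else (x, top_edge_y)
termination_by (bottom_edge_y - top_edge_y).toNat
decreasing_by omega

def move_right_if_needed_alt (current_square_buffer : List Int) (top_edge_hits : List Int) (left_edge_x : Int) (right_edge_x : Int) (top_edge_y : Int) (bottom_edge_y : Int) (n : Int) : Int × Int :=
  altLoop current_square_buffer top_edge_hits (top_edge_hits.length : Int) left_edge_x right_edge_x top_edge_y bottom_edge_y n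

-- ===== PRECONDITION & SPEC =====
def Spec_move_right_if_needed (current_square_buffer : List Int) (top_edge_hits : List Int) (left_edge_x : Int) (right_edge_x : Int) (top_edge_y : Int) (bottom_edge_y : Int) (n : Int) (out : Int × Int) : Prop := out = move_right_if_needed_alt current_square_buffer top_edge_hits left_edge_x right_edge_x top_edge_y bottom_edge_y n
instance (current_square_buffer : List Int) (top_edge_hits : List Int) (left_edge_x : Int) (right_edge_x : Int) (top_edge_y : Int) (bottom_edge_y : Int) (n : Int) (out : Int × Int) : Decidable (Spec_move_right_if_needed current_square_buffer top_edge_hits left_edge_x right_edge_x top_edge_y bottom_edge_y n out) := by unfold Spec_move_right_if_needed; infer_instance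

-- ===== CLAIM (what is proved, stated in full; the proofs are below) =====
def Claim_equal_move_right_if_needed : Prop := ∀ (current_square_buffer : List Int) (top_edge_hits : List Int) (left_edge_x : Int) (right_edge_x : Int) (top_edge_y : Int) (bottom_edge_y : Int) (n : Int), Dom_move_right_if_needed current_square_buffer top_edge_hits left_edge_x right_edge_x top_edge_y bottom_edge_y n → Spec_move_right_if_needed current_square_buffer top_edge_hits left_edge_x right_edge_x top_edge_y bottom_edge_y n (move_right_if_needed current_square_buffer top_edge_hits left_edge_x right_edge_x top_edge_y bottom_edge_y n)

-- ===== LEMMAS AND PROOFS =====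

-- erasing an element strictly below the scan position does not change the scan's result
lemma altAdvance_erase : ∀ (k : Nat) (hits : List Int) (v x rx : Int), (rx - x).toNat = k → v < x →
    altAdvance (hits.erase v) x rx = altAdvance hits x rx := by
  intro k
  induction k using Nat.strong_induction_on with
  | _ k ih =>
    intro hits v x rx hk hv
    have hc : ((hits.erase v).contains x) = (hits.contains x) := by
      simp [List.mem_erase_of_ne (by omega : x ≠ v)]
    rw [altAdvance, hc]
    conv_rhs => rw [altAdvance]
    split_ifs with h
    · exact ih (rx - (x+1)).toNat (by omega) hits v (x+1) rx rfl (by omega)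
    · rfl

-- A's advance-loop reaches the same x as B's read-only scan
lemma advA_snd (hits : List Int) (lx rx : Int) : (advA hits lx rx).2 = altAdvance hits lx rx := by
  fun_induction advA hits lx rx with
  | case1 hits lx h hits' hrem ih =>
    have hmem : lx ∈ hits := by simpa using h.1
    have he : hits' = hits.erase lx := by
      rw [PySem.List.remove?_eq_some_erase hits lx hmem] at hrem; exact (Option.some.inj hrem).symm
    subst he
    rw [ih, altAdvance_erase (rx - (lx+1)).toNat hits lx (lx+1) rx rfl (by omega)]
    conv_rhs => rw [altAdvance]
    rw [if_pos h]
  | case2 hits lx h hrem =>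
    exact absurd ((PySem.List.remove?_eq_none_iff _ _).1 hrem) (by simpa using h.1)
  | case3 hits lx h =>
    rw [altAdvance, if_neg h]

-- A's surviving list has exactly B's arithmetic size: one element removed per step advanced
lemma advA_len (hits : List Int) (lx rx : Int) :
    ((advA hits lx rx).1.length : Int) = (hits.length : Int) - ((advA hits lx rx).2 - lx) := by
  fun_induction advA hits lx rx with
  | case1 hits lx h hits' hrem ih =>
    have hmem : lx ∈ hits := by simpa using h.1
    have he : hits' = hits.erase lx := by
      rw [PySem.List.remove?_eq_some_erase hits lx hmem] at hrem; exact (Option.some.inj hrem).symm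
    have hlen : hits'.length + 1 = hits.length := by
      subst he
      have h1 := List.length_pos_of_mem hmem
      simp [List.length_erase_of_mem hmem]; omega
    rw [ih]; omega
  | case2 hits lx h hrem =>
    exact absurd ((PySem.List.remove?_eq_none_iff _ _).1 hrem) (by simpa using h.1)
  | case3 hits lx h => simp

-- one round of A's recursion equals one iteration of B's loop; induction on bottom_edge_y - top_edge_y
lemma loop_eq (csb : List Int) (rx by_ n : Int) :
    ∀ (k : Nat), ∀ (ty : Int), (by_ - ty).toNat = k → ∀ (hits : List Int) (lx : Int),
      move_right_if_needed csb hits lx rx ty by_ n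
        = altLoop csb hits (hits.length : Int) lx rx ty by_ n := by
  intro k
  induction k using Nat.strong_induction_on with
  | _ k ih =>
    intro ty hk hits lx
    rw [move_right_if_needed, altLoop]
    simp only [advA_snd]
    by_cases hc1 : ty + 3 < by_ ∧ altAdvance hits lx rx + 3 = rx
    · by_cases hc2 : (advA hits lx rx).1.length = 3
      · have hc3 : ty + 3 < by_ ∧ altAdvance hits lx rx + 3 = rx ∧
            (hits.length : Int) - (altAdvance hits lx rx - lx) = 3 := by
          refine ⟨hc1.1, hc1.2, ?_⟩
          have := advA_len hits lx rx
          rw [advA_snd] at this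
          omega
        rw [if_pos hc1, if_pos hc2, if_pos hc3]
        have hset : PySem.Set.ofList ((PySem.List.pyRange 0 3 1).filter
              (fun p => csb.contains (hash_x_y p (ty + 1) n)))
            = (PySem.List.pyRange 0 3 1).filter (fun p => csb.contains ((ty + 1) * n + p)) := by
          have hnd : ((PySem.List.pyRange 0 3 1).filter
              (fun p => csb.contains (hash_x_y p (ty + 1) n))).Nodup :=
            (PySem.List.nodup_pyRange_one 0 3).filter _
          rw [PySem.Set.ofList_eq_self_of_nodup _ hnd]
          simp [hash_x_y]
        split_ifs with h2
        · rw [hset]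
          exact ih (by_ - (ty + 1)).toNat (by omega) (ty + 1) rfl _ 0
        · rfl
      · have hc3 : ¬ (ty + 3 < by_ ∧ altAdvance hits lx rx + 3 = rx ∧
            (hits.length : Int) - (altAdvance hits lx rx - lx) = 3) := by
          have := advA_len hits lx rx
          rw [advA_snd] at this
          intro hcon
          omega
        rw [if_pos hc1, if_neg hc2, if_neg hc3]
    · have hc3 : ¬ (ty + 3 < by_ ∧ altAdvance hits lx rx + 3 = rx ∧
          (hits.length : Int) - (altAdvance hits lx rx - lx) = 3) := by
        intro hcon; exact hc1 ⟨hcon.1, hcon.2.1⟩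
      rw [if_neg hc1, if_neg hc3]

-- ===== VERDICT (by name: the statement is the Claim_ definition above) =====
theorem move_right_if_needed_spec : Claim_equal_move_right_if_needed := by
  intro csb hits lx rx ty by_ n _
  unfold Spec_move_right_if_needed move_right_if_needed_alt
  exact loop_eq csb rx by_ n (by_ - ty).toNat ty rfl hits lx
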